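-- pv_equiv track=rewrite | github.com/RDNordic/ai-championship-warroom | submissions/grocerybot-ko-version/src/grocerybot/strategies/memory_solo.py | _pick_multiset_combinations
-- ===== SOURCE A (Python) =====
-- from itertools import combinations
--
-- def _pick_multiset_combinations(
--     items: list[str],
--     k: int,
-- ) -> set[tuple[str, ...]]:
--     """Unique k-sized multiset combinations from a list with duplicates."""
--     if k <= 0:
--         return {()}
--     if k > len(items):
--         return set()
--     result: set[tuple[str, ...]] = set()
--     for idxs in combinations(range(len(items)), k):
--         combo = tuple(sorted(items[i] for i in idxs))
--         result.add(combo)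
--     return result
-- ===== SOURCE B (Python) =====
-- def _pick_multiset_combinations(
--     items: list[str],
--     k: int,
-- ) -> set[tuple[str, ...]]:
--     """Unique k-sized multiset combinations from a list with duplicates.
--
--     Bottom-up dynamic programming over the suffixes of `items`: one row
--     dp[j] = distinct sorted j-tuples drawn from the current suffix, updated
--     once per element scanned right-to-left.
--     """
--     if k <= 0:
--         return {()}
--     if k > len(items):
--         return set()
--     dp: list[list[tuple[str, ...]]] = [[()]] + [[] for _ in range(k)]
--     for x in reversed(items):
--         new = [dp[0]]
--         for j in range(1, k + 1):
--             merged = [tuple(sorted((x,) + c)) for c in dp[j - 1]] + dp[j]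
--             new.append(list(dict.fromkeys(merged)))
--         dp = new
--     return set(dp[k])
-- ===== Notes on version B (the rewrite author's own statement) =====
-- stated objective: alternative
-- what changed: A enumerates all C(n,k) index combinations and deduplicates them into a set; B never touches index combinations: it fills a bottom-up dynamic-programming row dp[j] = distinct sorted j-tuples of the current suffix, scanning items right-to-left once.
import Mathlib
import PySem

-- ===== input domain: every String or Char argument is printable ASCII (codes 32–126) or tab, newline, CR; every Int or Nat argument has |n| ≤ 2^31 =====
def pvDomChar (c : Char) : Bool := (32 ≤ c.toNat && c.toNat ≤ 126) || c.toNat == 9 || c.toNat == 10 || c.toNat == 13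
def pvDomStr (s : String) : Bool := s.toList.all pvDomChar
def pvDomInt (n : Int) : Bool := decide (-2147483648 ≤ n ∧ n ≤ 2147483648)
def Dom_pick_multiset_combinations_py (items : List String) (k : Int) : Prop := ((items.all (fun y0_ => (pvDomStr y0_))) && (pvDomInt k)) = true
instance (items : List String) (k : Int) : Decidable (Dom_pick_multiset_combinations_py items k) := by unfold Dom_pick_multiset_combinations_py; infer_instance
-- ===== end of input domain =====

-- B replaces A's enumeration of all C(n,k) index combinations (deduplicated into a set) by a
-- bottom-up dynamic-programming table over the suffixes of `items`: a different algorithm.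
-- Python returns a set; both ports return its insertion-order element list (distinct elements).

-- ===== PORT A =====
-- itertools.combinations(l, k), in itertools' order (helper for port A)
def pvCombA {α : Type} (l : List α) (k : Nat) : List (List α) :=
  match l, k with
  | _, 0 => [[]]
  | [], _ + 1 => []
  | x :: xs, k' + 1 => (pvCombA xs k').map (fun c => x :: c) ++ pvCombA xs (k' + 1)

def pick_multiset_combinations_py (items : List String) (k : Int) : List (List String) :=
  if k ≤ 0 then [[]]
  else if k > PySem.List.len items then []
  else
    (pvCombA (PySem.List.pyRange 0 (PySem.List.len items) 1) k.toNat).foldl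
      (fun result idxs =>
        PySem.Set.add result
          (PySem.List.sorted (idxs.map (fun i => PySem.List.pyGetD items i "")) (fun x => x) false))
      PySem.Set.empty

-- ===== PORT B =====
-- one right-to-left DP step of Source B: row `new` from row `dp` for the element x
-- (new[0] = dp[0]; new[j] = dedup(sorted-cons x onto dp[j-1] ++ dp[j]) for 1 ≤ j ≤ k)
def pvStepB (x : String) (dp : List (List (List String))) : List (List (List String)) :=
  match dp with
  | [] => []
  | d0 :: rest =>
    d0 :: List.zipWith
      (fun prev cur =>
        PySem.List.dedup
          ((prev.map (fun c => PySem.List.sorted (x :: c) (fun y => y) false)) ++ cur))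
      (d0 :: rest) rest

def pick_multiset_combinations_py_alt (items : List String) (k : Int) : List (List String) :=
  if k ≤ 0 then [[]]
  else if k > PySem.List.len items then []
  else
    PySem.Set.ofList ((items.foldr pvStepB ([[]] :: List.replicate k.toNat [])).getD k.toNat [])

-- ===== PRECONDITION & SPEC =====
def Spec_pick_multiset_combinations_py (items : List String) (k : Int) (out : List (List String)) : Prop := out = pick_multiset_combinations_py_alt items k
instance (items : List String) (k : Int) (out : List (List String)) : Decidable (Spec_pick_multiset_combinations_py items k out) := by unfold Spec_pick_multiset_combinations_py; infer_instance

-- ===== CLAIM (what is proved, stated in full; the proofs are below) =====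
def Claim_equal_pick_multiset_combinations_py : Prop := ∀ (items : List String) (k : Int), Dom_pick_multiset_combinations_py items k → Spec_pick_multiset_combinations_py items k (pick_multiset_combinations_py items k)

-- ===== LEMMAS AND PROOFS =====

-- proof-side characterisation of dp[j] after scanning the suffix l
def pvR (l : List String) (j : Nat) : List (List String) :=
  match l, j with
  | _, 0 => [[]]
  | [], _ + 1 => []
  | x :: xs, j' + 1 =>
    PySem.List.dedup
      (((pvR xs j').map (fun c => PySem.List.sorted (x :: c) (fun y => y) false)) ++
        pvR xs (j' + 1))

-- the whole DP row is [pvR l 0, …, pvR l m]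
theorem pvDpInv (l : List String) (m : Nat) :
    l.foldr pvStepB ([[]] :: List.replicate m []) = (List.range (m + 1)).map (pvR l) := by
  induction l with
  | nil =>
    rw [List.foldr_nil, List.range_succ_eq_map, List.map_cons, List.map_map]
    have : (pvR [] ∘ Nat.succ) = fun _ => ([] : List (List String)) := by
      funext j; simp [pvR, Function.comp]
    rw [this, List.map_const']
    simp [pvR]
  | cons x xs ih =>
    rw [List.foldr_cons, ih, List.range_succ_eq_map, List.map_cons]
    simp only [pvStepB]
    congr 1
    · simp [pvR]
    · apply List.ext_getElem
      · simp
      · intro i h1 h2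
        simp only [List.getElem_zipWith, List.getElem_map, List.getElem_range] at *
        cases i with
        | zero =>
          simp only [List.getElem_cons_zero, List.length_map, List.length_range] at h2 ⊢
          simp [pvR]
        | succ i' =>
          simp only [List.getElem_cons_succ, List.getElem_map, List.getElem_range,
            List.length_map, List.length_range] at h2 ⊢
          rfl

-- combinations of a mapped list are the mapped combinations
theorem pvCombA_map {α β : Type} (h : α → β) (l : List α) (k : Nat) :
    (pvCombA l k).map (List.map h) = pvCombA (l.map h) k := by
  induction l generalizing k with
  | nil => cases k <;> simp [pvCombA]
  | cons x xs ih =>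
    cases k with
    | zero => simp [pvCombA]
    | succ k' => simp [pvCombA, ← ih, Function.comp_def]

-- a set already containing x is unchanged by adding it
theorem pvAdd_of_mem {α : Type} [BEq α] [LawfulBEq α] (s : PySem.Set α) (x : α) (h : x ∈ s) :
    PySem.Set.add s x = s := by
  simp [PySem.Set.add, PySem.Set.contains, h]

-- dedup commutes through a map: ofList (map g (ofList xs)) = ofList (map g xs)
theorem pvOfList_map_ofList {α β : Type} [BEq α] [LawfulBEq α] [BEq β] [LawfulBEq β]
    (g : α → β) (xs : List α) :
    PySem.Set.ofList ((PySem.Set.ofList xs).map g) = PySem.Set.ofList (xs.map g) := by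
  induction xs using List.reverseRecOn with
  | nil => rfl
  | append_singleton ys y ih =>
    rw [List.map_append, List.map_singleton, PySem.Set.ofList_append_singleton,
      PySem.Set.ofList_append_singleton]
    by_cases hy : y ∈ ys
    · rw [pvAdd_of_mem _ y ((PySem.Set.mem_ofList ys y).2 hy), ih,
        pvAdd_of_mem _ (g y) ((PySem.Set.mem_ofList (ys.map g) (g y)).2 (List.mem_map_of_mem hy))]
    · have hadd : PySem.Set.add (PySem.Set.ofList ys) y = PySem.Set.ofList ys ++ [y] := by
        simp [PySem.Set.add, PySem.Set.contains, PySem.Set.mem_ofList, hy]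
      rw [hadd, List.map_append, List.map_singleton, PySem.Set.ofList_append_singleton, ih]

-- updating with a deduplicated list is updating with the list
theorem pvUpdate_ofList {α : Type} [BEq α] [LawfulBEq α] (s : PySem.Set α) (xs : List α) :
    PySem.Set.update s (PySem.Set.ofList xs) = PySem.Set.update s xs := by
  rw [PySem.Set.update_eq_append_filter, PySem.Set.update_eq_append_filter,
    PySem.Set.ofList_ofList]

-- sorting after consing onto an already sorted list is sorting the cons
theorem pvSorted_cons_sorted (x : String) (c : List String) :
    PySem.List.sorted (x :: PySem.List.sorted c (fun y => y) false) (fun y => y) false =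
      PySem.List.sorted (x :: c) (fun y => y) false := by
  apply PySem.List.sorted_eq_sorted_of_perm
  · exact fun a b h => h
  · exact List.Perm.cons x (PySem.List.sorted_perm c (fun y => y) false)

-- MAIN LEMMA: the deduplicated sorted combinations, in A's first-occurrence order, are pvR
theorem pvMain (l : List String) (j : Nat) :
    PySem.Set.ofList ((pvCombA l j).map (fun c => PySem.List.sorted c (fun y => y) false)) =
      pvR l j := by
  induction l generalizing j with
  | nil => cases j <;> rfl
  | cons x xs ih =>
    cases j with
    | zero => rfl
    | succ j' =>
      rw [pvR, PySem.List.dedup_eq_ofList, ← ih j', ← ih (j' + 1)]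
      rw [pvCombA, List.map_append, PySem.Set.ofList_append, PySem.Set.ofList_append,
        pvUpdate_ofList]
      congr 1
      rw [pvOfList_map_ofList, List.map_map, List.map_map]
      congr 1
      refine List.map_congr_left (fun c _ => ?_)
      exact (pvSorted_cons_sorted x c).symm

-- pvR is duplicate-free, so set(dp[k]) in B is dp[k] itself
theorem pvR_nodup (l : List String) (j : Nat) : (pvR l j).Nodup := by
  cases l with
  | nil => cases j <;> simp [pvR]
  | cons x xs =>
    cases j with
    | zero => simp [pvR]
    | succ j' =>
      rw [pvR, PySem.List.dedup_eq_ofList]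
      exact PySem.Set.nodup_ofList _

-- ===== VERDICT (by name: the statement is the Claim_ definition above) =====
theorem pick_multiset_combinations_py_spec : Claim_equal_pick_multiset_combinations_py := by
  intro items k _
  unfold Spec_pick_multiset_combinations_py
  unfold pick_multiset_combinations_py pick_multiset_combinations_py_alt
  by_cases h0 : k ≤ 0
  · simp [h0]
  · rw [if_neg h0, if_neg h0]
    by_cases h1 : k > PySem.List.len items
    · rw [if_pos h1, if_pos h1]
    · rw [if_neg h1, if_neg h1]
      rw [pvDpInv, List.getD_eq_getElem?_getD, List.getElem?_map, List.getElem?_range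
        (Nat.lt_succ_self k.toNat)]
      simp only [Option.map_some, Option.getD_some]
      rw [← PySem.Set.update_map_eq_foldl_add, PySem.Set.update_empty]
      have hrange : (PySem.List.pyRange 0 (PySem.List.len items) 1).map
          (fun i => PySem.List.pyGetD items i "") = items := by
        simpa [PySem.List.len_eq] using PySem.List.map_pyGetD_pyRange_zero items ""
      have hcomb : (pvCombA (PySem.List.pyRange 0 (PySem.List.len items) 1) k.toNat).map
          (fun idxs => PySem.List.sorted (idxs.map (fun i => PySem.List.pyGetD items i "")) (fun x => x) false)
          = (pvCombA items k.toNat).map (fun c => PySem.List.sorted c (fun y => y) false) := by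
        conv_rhs => rw [← hrange, ← pvCombA_map]
        rw [List.map_map]
        rfl
      rw [hcomb, pvMain, PySem.Set.ofList_eq_self_of_nodup _ (pvR_nodup items k.toNat)]
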